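-- pv_equiv track=rewrite | github.com/classmodel/classmodel.github.io | format_publications.py | format_list_harvard
-- ===== SOURCE A (Python) =====
-- def format_list_harvard(list_in):
--     result = ''
--     for i in range(len(list_in)):
--         result += list_in[i]
--         if(i < len(list_in) - 2):
--             result += ', '
--         elif(i == len(list_in) - 2):
--             result += ' & '
--     return result
-- ===== SOURCE B (Python) =====
-- def format_list_harvard(list_in):
--     if not list_in:
--         return ''
--     if len(list_in) == 1:
--         return list_in[0]
--     return ', '.join(list_in[:-1]) + ' & ' + list_in[-1]
-- ===== Notes on version B (the rewrite author's own statement) =====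
-- stated objective: simpler
-- what changed: Replaces the index loop with per-iteration distance-to-end branching by explicit empty/singleton guards plus a single ', '.join of all-but-last spliced with ' & ' before the last element.
import Mathlib
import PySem

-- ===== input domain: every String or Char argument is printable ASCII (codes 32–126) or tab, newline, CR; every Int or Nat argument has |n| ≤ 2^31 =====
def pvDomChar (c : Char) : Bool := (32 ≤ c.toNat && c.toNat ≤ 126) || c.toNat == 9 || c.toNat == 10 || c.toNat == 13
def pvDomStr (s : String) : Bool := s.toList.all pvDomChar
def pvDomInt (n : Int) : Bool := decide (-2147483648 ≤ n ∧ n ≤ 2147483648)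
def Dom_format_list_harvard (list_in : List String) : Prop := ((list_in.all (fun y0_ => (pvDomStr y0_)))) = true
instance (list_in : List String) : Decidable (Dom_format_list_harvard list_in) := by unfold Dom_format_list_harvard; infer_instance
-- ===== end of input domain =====

-- B replaces A's index loop (with per-index distance-to-end branching) by empty/singleton
-- guards plus a ', '-join of all-but-last spliced with ' & ' before the last element (simpler).

-- ===== PORT A =====
def format_list_harvard (list_in : List String) : String :=
  (PySem.List.pyRange 0 (PySem.List.len list_in) 1).foldl
    (fun result i =>
      let result := result ++ PySem.List.pyGetD list_in i ""
      if i < PySem.List.len list_in - 2 then result ++ ", "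
      else if i = PySem.List.len list_in - 2 then result ++ " & "
      else result) ""

-- ===== PORT B =====
def format_list_harvard_alt (list_in : List String) : String :=
  match list_in with
  | [] => ""
  | [x] => x
  | x :: y :: ys =>
    PySem.Str.join ", " (PySem.List.slice (x :: y :: ys) none (some (-1)))
      ++ " & " ++ PySem.List.pyGetD (x :: y :: ys) (-1) ""

-- ===== PRECONDITION & SPEC =====
def Spec_format_list_harvard (list_in : List String) (out : String) : Prop := out = format_list_harvard_alt list_in
instance (list_in : List String) (out : String) : Decidable (Spec_format_list_harvard list_in out) := by unfold Spec_format_list_harvard; infer_instance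

-- ===== CLAIM (what is proved, stated in full; the proofs are below) =====
def Claim_equal_format_list_harvard : Prop := ∀ (list_in : List String), Dom_format_list_harvard list_in → Spec_format_list_harvard list_in (format_list_harvard list_in)

-- ===== LEMMAS AND PROOFS =====

-- recursive characterisation of A's output
def harvardRec : List String → String
  | [] => ""
  | [x] => x
  | x :: y :: ys => x ++ (if ys = [] then " & " else ", ") ++ harvardRec (y :: ys)

theorem harvard_fold_suffix (xs : List String) :
    ∀ (k j : Nat) (r : String), xs.length = j + k →
    (PySem.List.pyRange (j : Int) (PySem.List.len xs) 1).foldl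
      (fun result i =>
        let result := result ++ PySem.List.pyGetD xs i ""
        if i < PySem.List.len xs - 2 then result ++ ", "
        else if i = PySem.List.len xs - 2 then result ++ " & "
        else result) r
    = r ++ harvardRec (xs.drop j) := by
  intro k
  induction k with
  | zero =>
    intro j r h
    have hj : (PySem.List.len xs : Int) ≤ (j : Int) := by
      simp only [PySem.List.len_eq]; omega
    rw [PySem.List.pyRange_one_eq_nil hj, List.foldl_nil,
      List.drop_eq_nil_of_le (by omega)]
    simp [harvardRec]
  | succ k ih =>
    intro j r h
    have hjlen : j < xs.length := by omega
    have hlt : (j : Int) < PySem.List.len xs := by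
      simp only [PySem.List.len_eq]; exact_mod_cast hjlen
    rw [PySem.List.pyRange_one_cons hlt, List.foldl_cons,
        show ((j : Int) + 1) = ((j + 1 : Nat) : Int) by push_cast; ring,
        ih (j + 1) _ (by omega)]
    have hget : PySem.List.pyGetD xs ((j : Int)) "" = xs[j] := by
      rw [PySem.List.pyGetD_eq_getElem xs "" (Int.natCast_nonneg j) (by exact_mod_cast hjlen)]
      simp
    have hdrop : xs.drop j = xs[j] :: xs.drop (j + 1) := List.drop_eq_getElem_cons hjlen
    have hlen2 : (xs.drop (j + 1)).length = k := by simp; omega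
    simp only [PySem.List.len_eq, hget, hdrop]
    rcases htail : xs.drop (j + 1) with _ | ⟨b, _ | ⟨c, bs⟩⟩ <;> rw [htail] at hlen2
    · -- last element: j = length - 1
      simp only [List.length_nil] at hlen2
      rw [if_neg (by omega), if_neg (by omega)]
      simp [harvardRec]
    · -- second to last: j = length - 2
      simp only [List.length_cons, List.length_nil] at hlen2
      rw [if_neg (by omega), if_pos (by omega)]
      simp [harvardRec, String.append_assoc]
    · -- at least two more elements after j
      simp only [List.length_cons] at hlen2
      rw [if_pos (by omega)]
      simp [harvardRec, String.append_assoc]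

theorem harvardRec_eq_alt : ∀ (xs : List String), harvardRec xs = format_list_harvard_alt xs
  | [] => rfl
  | [x] => rfl
  | [x, y] => by
    apply String.toList_injective
    simp [harvardRec, format_list_harvard_alt, PySem.List.slice_to_neg_one,
      PySem.List.pyGetD_neg_one _ _ (by simp : ([x, y] : List String) ≠ []),
      PySem.Str.toList_join, PySem.Chars.join_singleton]
  | x :: y :: z :: ys => by
    have ih := harvardRec_eq_alt (y :: z :: ys)
    have hne : (z :: ys : List String) ≠ [] := by simp
    have hdl : (x :: y :: z :: ys).dropLast = x :: y :: (z :: ys).dropLast := by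
      simp [List.dropLast]
    have hlast : PySem.List.pyGetD (x :: y :: z :: ys) (-1) ""
        = PySem.List.pyGetD (y :: z :: ys) (-1) "" := by
      rw [PySem.List.pyGetD_neg_one _ _ (by simp : (x :: y :: z :: ys : List String) ≠ []),
        PySem.List.pyGetD_neg_one _ _ (by simp : (y :: z :: ys : List String) ≠ []),
        List.getLast_cons (by simp)]
    rw [show harvardRec (x :: y :: z :: ys) = x ++ ", " ++ harvardRec (y :: z :: ys) from by
          simp [harvardRec, hne, String.append_assoc],
        ih]
    apply String.toList_injective
    simp only [format_list_harvard_alt, PySem.List.slice_to_neg_one, hdl, hlast,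
      String.toList_append, PySem.Str.toList_join, List.map_cons, PySem.Chars.join_cons_cons]
    simp [List.append_assoc]

-- ===== VERDICT (by name: the statement is the Claim_ definition above) =====
theorem format_list_harvard_spec : Claim_equal_format_list_harvard := by
  intro xs _
  unfold Spec_format_list_harvard format_list_harvard
  rw [show (0 : Int) = ((0 : Nat) : Int) by rfl,
    harvard_fold_suffix xs xs.length 0 "" (by omega)]
  simpa using harvardRec_eq_alt xs
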